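-- pv_equiv track=rewrite | github.com/ttphan/BeerPython | app/view/mainWindow.py | maxes
-- ===== SOURCE A (Python) =====
-- def maxes(array):
--     "Get all maximums instead of just one"
--     key = lambda x: x[1]
--
--     m, max_list = key(array[0]), []
--     for s in array:
--         k = key(s)
--         if k > m:
--             m, max_list = k, [s]
--         elif k == m:
--             max_list.append(s)
--     return m, max_list
-- ===== SOURCE B (Python) =====
-- def maxes(array):
--     "Get all maximums instead of just one"
--     m = max(x[1] for x in array)
--     return m, [x for x in array if x[1] == m]
-- ===== Notes on version B (the rewrite author's own statement) =====
-- stated objective: simpler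
-- what changed: Replaces A's single fused scan maintaining (current max, running list) with a reduce-then-filter pair: compute the maximum of the keys, then filter the elements achieving it.
import Mathlib
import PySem

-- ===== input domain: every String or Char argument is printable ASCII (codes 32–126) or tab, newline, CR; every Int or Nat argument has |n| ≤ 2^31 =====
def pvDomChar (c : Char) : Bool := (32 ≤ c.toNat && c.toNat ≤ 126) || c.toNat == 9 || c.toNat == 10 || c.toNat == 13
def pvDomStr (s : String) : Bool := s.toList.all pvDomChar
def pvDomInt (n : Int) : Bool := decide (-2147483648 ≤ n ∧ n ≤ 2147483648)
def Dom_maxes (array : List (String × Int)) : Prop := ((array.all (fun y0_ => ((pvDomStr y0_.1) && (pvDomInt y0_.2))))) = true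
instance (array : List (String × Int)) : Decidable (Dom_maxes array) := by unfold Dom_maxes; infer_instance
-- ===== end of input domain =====

-- B replaces A's fused max-tracking scan with a reduce-then-filter pair (max of keys, then filter); return values proved equal on non-empty input.


-- ===== PORT A =====
-- A: m, max_list = array[0][1], []; then one pass updating (m, max_list).
def maxes (array : List (String × Int)) : Int × (List (String × Int)) :=
  match array with
  | [] => (0, [])   -- Python raises IndexError on array[0]; excluded by Pre_maxes
  | a :: _ =>
    array.foldl
      (fun (st : Int × List (String × Int)) s =>
        let k := s.2
        if k > st.1 then (k, [s])
        else if k = st.1 then (st.1, st.2 ++ [s])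
        else st)
      (a.2, [])

-- ===== PORT B =====
-- B: m = max(x[1] for x in array); then [x for x in array if x[1] == m].
def maxes_alt (array : List (String × Int)) : Int × (List (String × Int)) :=
  match array with
  | [] => (0, [])   -- Python's max raises ValueError on the empty sequence; excluded by Pre_maxes
  | a :: rest =>
    let m := rest.foldl (fun acc x => max acc x.2) a.2
    (m, array.filter (fun x => x.2 == m))

-- ===== PRECONDITION & SPEC =====
-- Pre_ excludes only the empty list, on which both Pythons raise (A: IndexError, B: ValueError).
def Pre_maxes (array : List (String × Int)) : Prop := array ≠ []
instance (array : List (String × Int)) : Decidable (Pre_maxes array) := by unfold Pre_maxes; infer_instance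
def pvWitness_maxes : (List (String × Int)) := [("a", 1), ("b", 2), ("c", 2)]

def Spec_maxes (array : List (String × Int)) (out : Int × (List (String × Int))) : Prop := out = maxes_alt array
instance (array : List (String × Int)) (out : Int × (List (String × Int))) : Decidable (Spec_maxes array out) := by unfold Spec_maxes; infer_instance

-- ===== CLAIM (what is proved, stated in full; the proofs are below) =====
def Claim_equal_maxes : Prop := ∀ (array : List (String × Int)), Dom_maxes array → Pre_maxes array → Spec_maxes array (maxes array)

-- ===== LEMMAS AND PROOFS =====

def stepA (st : Int × List (String × Int)) (s : String × Int) : Int × List (String × Int) :=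
  if s.2 > st.1 then (s.2, [s])
  else if s.2 = st.1 then (st.1, st.2 ++ [s])
  else st

theorem le_foldl_max (l : List (String × Int)) (m : Int) :
    m ≤ l.foldl (fun acc x => max acc x.2) m := by
  induction l generalizing m with
  | nil => simp
  | cons s l ih =>
    simp only [List.foldl_cons]
    exact le_trans (le_max_left m s.2) (ih (max m s.2))

theorem foldA_char (l : List (String × Int)) (m : Int) (acc : List (String × Int)) :
    l.foldl stepA (m, acc) =
      (l.foldl (fun acc x => max acc x.2) m,
       (if m = l.foldl (fun acc x => max acc x.2) m then acc else []) ++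
         l.filter (fun x => x.2 == l.foldl (fun acc x => max acc x.2) m)) := by
  induction l generalizing m acc with
  | nil => simp
  | cons s l ih =>
    simp only [List.foldl_cons, List.filter_cons]
    rcases lt_trichotomy m s.2 with h | h | h
    · -- k > m : state becomes (s.2, [s])
      have hstep : stepA (m, acc) s = (s.2, [s]) := by
        unfold stepA; rw [if_pos h]
      have hmax : max m s.2 = s.2 := max_eq_right (le_of_lt h)
      rw [hstep, ih]
      simp only [hmax]
      have hM : m ≠ l.foldl (fun acc x => max acc x.2) s.2 :=
        ne_of_lt (lt_of_lt_of_le h (le_foldl_max l s.2))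
      simp only [hM, if_false, List.nil_append]
      by_cases hb : s.2 = l.foldl (fun acc x => max acc x.2) s.2
      · rw [if_pos hb, if_pos (beq_iff_eq.mpr hb)]
        simp
      · rw [if_neg hb, if_neg (fun hc => hb (beq_iff_eq.mp hc))]
        simp
    · -- k = m : append s
      have hstep : stepA (m, acc) s = (m, acc ++ [s]) := by
        unfold stepA; rw [if_neg (by omega), if_pos h.symm]
      have hmax : max m s.2 = m := by omega
      rw [hstep, ih]
      simp only [hmax]
      by_cases hM : m = l.foldl (fun acc x => max acc x.2) m
      · have hb : (s.2 == l.foldl (fun acc x => max acc x.2) m) = true := by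
          rw [← h]; simp [← hM]
        rw [if_pos hM, if_pos hM, if_pos hb]
        simp
      · have hne : ¬ (s.2 == l.foldl (fun acc x => max acc x.2) m) = true := by
          simp [← h]; exact hM
        simp [hM, hne]
    · -- k < m : unchanged
      have hstep : stepA (m, acc) s = (m, acc) := by
        unfold stepA; rw [if_neg (by omega), if_neg (by omega)]
      have hmax : max m s.2 = m := by omega
      rw [hstep, ih]
      simp only [hmax]
      have hlt : s.2 < l.foldl (fun acc x => max acc x.2) m :=
        lt_of_lt_of_le h (le_foldl_max l m)
      have hne : ¬ (s.2 == l.foldl (fun acc x => max acc x.2) m) = true := by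
        simp; omega
      simp [hne]

-- ===== VERDICT (by name: the statement is the Claim_ definition above) =====
theorem maxes_spec : Claim_equal_maxes := by
  intro array _ hpre
  unfold Spec_maxes
  match array with
  | [] => exact absurd rfl hpre
  | a :: rest =>
    show maxes (a :: rest) = maxes_alt (a :: rest)
    have h1 : maxes (a :: rest) = List.foldl stepA (a.2, [a]) rest := by
      show List.foldl stepA (stepA (a.2, []) a) rest = _
      congr 1
      unfold stepA
      rw [if_neg (by omega), if_pos rfl]
      simp
    rw [h1, foldA_char]
    unfold maxes_alt
    by_cases h : a.2 = rest.foldl (fun acc x => max acc x.2) a.2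
    · simp [← h]
    · have hne : ¬ (a.2 == rest.foldl (fun acc x => max acc x.2) a.2) = true := by simp [h]
      simp [h, hne]
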